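-- pv_equiv track=rewrite | github.com/andrea00mauro00/marine-pollution-tracking | storage_consumer/storage_consumer.py | is_same_pollutant_type
-- ===== SOURCE A (Python) =====
-- def is_same_pollutant_type(type1, type2):
--     """Verifica se due tipi di inquinanti sono considerati equivalenti"""
--     if type1 == type2:
--         return True
--
--     # Mappa di sinonimi per i tipi di inquinanti
--     synonyms = {
--         "oil": ["oil_spill", "crude_oil", "petroleum"],
--         "chemical": ["chemical_spill", "toxic_chemicals"],
--         "sewage": ["waste_water", "sewage_discharge"],
--         "plastic": ["microplastics", "plastic_debris"],
--         "algae": ["algal_bloom", "red_tide"]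
--     }
--
--     # Controlla se i tipi sono sinonimi
--     for category, types in synonyms.items():
--         if (type1 == category or type1 in types) and (type2 == category or type2 in types):
--             return True
--
--     return False
-- ===== SOURCE B (Python) =====
-- # B: flat canonical-name lookup table built once; compare canonical forms (same return value as A).
-- _SYNONYMS = {
--     "oil": ["oil_spill", "crude_oil", "petroleum"],
--     "chemical": ["chemical_spill", "toxic_chemicals"],
--     "sewage": ["waste_water", "sewage_discharge"],
--     "plastic": ["microplastics", "plastic_debris"],
--     "algae": ["algal_bloom", "red_tide"],
-- }
-- _CANON = {}
-- for _cat, _syns in _SYNONYMS.items():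
--     _CANON[_cat] = _cat
--     for _s in _syns:
--         _CANON[_s] = _cat
--
-- def is_same_pollutant_type(type1, type2):
--     """Verifica se due tipi di inquinanti sono considerati equivalenti"""
--     if type1 == type2:
--         return True
--     return _CANON.get(type1, type1) == _CANON.get(type2, type2)
-- ===== Notes on version B (the rewrite author's own statement) =====
-- stated objective: simpler
-- what changed: Replaces the per-call scan over categories with their synonym lists by a reverse-lookup table (synonym/category -> category) built once at import; the function body becomes a single canonical-name comparison.
import Mathlib
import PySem

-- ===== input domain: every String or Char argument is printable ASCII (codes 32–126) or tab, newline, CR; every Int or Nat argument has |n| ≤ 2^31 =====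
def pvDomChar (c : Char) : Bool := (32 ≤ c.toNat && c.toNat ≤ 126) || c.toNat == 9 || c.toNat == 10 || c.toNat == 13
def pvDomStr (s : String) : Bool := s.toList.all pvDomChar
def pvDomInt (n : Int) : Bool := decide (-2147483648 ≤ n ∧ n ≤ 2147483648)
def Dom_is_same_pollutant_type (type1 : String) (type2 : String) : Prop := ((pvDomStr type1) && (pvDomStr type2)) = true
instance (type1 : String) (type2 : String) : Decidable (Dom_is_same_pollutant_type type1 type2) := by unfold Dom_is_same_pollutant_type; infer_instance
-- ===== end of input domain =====

-- B replaces A's per-call scan over category/synonym lists with a reverse-lookup table built once (simpler body).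

-- ===== PORT A =====
def pvSynonymsA : List (String × List String) :=
  [("oil", ["oil_spill", "crude_oil", "petroleum"]),
   ("chemical", ["chemical_spill", "toxic_chemicals"]),
   ("sewage", ["waste_water", "sewage_discharge"]),
   ("plastic", ["microplastics", "plastic_debris"]),
   ("algae", ["algal_bloom", "red_tide"])]

-- the for-loop with early return, as structural recursion over the items
def pvLoopA (type1 type2 : String) : List (String × List String) → Bool
  | [] => false
  | (category, types) :: rest =>
      if (type1 == category || types.contains type1) && (type2 == category || types.contains type2) then
        true
      else pvLoopA type1 type2 rest

def is_same_pollutant_type (type1 : String) (type2 : String) : Bool :=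
  if type1 == type2 then true
  else pvLoopA type1 type2 pvSynonymsA

-- ===== PORT B =====
def pvSynonymsB : List (String × List String) := pvSynonymsA

-- the module-level table-building loop of Source B
def pvCanonTable : PySem.Dict String String :=
  pvSynonymsB.foldl
    (fun d p => p.2.foldl (fun d s => PySem.Dict.insert d s p.1) (PySem.Dict.insert d p.1 p.1))
    PySem.Dict.empty

def is_same_pollutant_type_alt (type1 : String) (type2 : String) : Bool :=
  if type1 == type2 then true
  else PySem.Dict.getD pvCanonTable type1 type1 == PySem.Dict.getD pvCanonTable type2 type2

-- ===== PRECONDITION & SPEC =====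
def Spec_is_same_pollutant_type (type1 : String) (type2 : String) (out : Bool) : Prop := out = is_same_pollutant_type_alt type1 type2
instance (type1 : String) (type2 : String) (out : Bool) : Decidable (Spec_is_same_pollutant_type type1 type2 out) := by unfold Spec_is_same_pollutant_type; infer_instance

-- ===== CLAIM (what is proved, stated in full; the proofs are below) =====
def Claim_equal_is_same_pollutant_type : Prop := ∀ (type1 : String) (type2 : String), Dom_is_same_pollutant_type type1 type2 → Spec_is_same_pollutant_type type1 type2 (is_same_pollutant_type type1 type2)

-- ===== LEMMAS AND PROOFS =====

-- all strings appearing in the synonyms map (categories and synonyms)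
def pvKeys : List String :=
  ["oil", "oil_spill", "crude_oil", "petroleum",
   "chemical", "chemical_spill", "toxic_chemicals",
   "sewage", "waste_water", "sewage_discharge",
   "plastic", "microplastics", "plastic_debris",
   "algae", "algal_bloom", "red_tide"]

lemma pvLoopA_false_left (t1 t2 : String) (h : t1 ∉ pvKeys) :
    pvLoopA t1 t2 pvSynonymsA = false := by
  simp only [pvKeys, List.mem_cons, List.not_mem_nil, or_false, not_or] at h
  obtain ⟨h1, h2, h3, h4, h5, h6, h7, h8, h9, h10, h11, h12, h13, h14, h15, h16⟩ := h
  simp [pvLoopA, pvSynonymsA, h1, h2, h3, h4, h5, h6, h7, h8, h9, h10, h11, h12, h13, h14, h15, h16]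

lemma pvLoopA_false_right (t1 t2 : String) (h : t2 ∉ pvKeys) :
    pvLoopA t1 t2 pvSynonymsA = false := by
  simp only [pvKeys, List.mem_cons, List.not_mem_nil, or_false, not_or] at h
  obtain ⟨h1, h2, h3, h4, h5, h6, h7, h8, h9, h10, h11, h12, h13, h14, h15, h16⟩ := h
  simp [pvLoopA, pvSynonymsA, h1, h2, h3, h4, h5, h6, h7, h8, h9, h10, h11, h12, h13, h14, h15, h16]

lemma pvCanonTable_eq : pvCanonTable = PySem.Dict.mk
    [("oil", "oil"), ("oil_spill", "oil"), ("crude_oil", "oil"), ("petroleum", "oil"),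
     ("chemical", "chemical"), ("chemical_spill", "chemical"), ("toxic_chemicals", "chemical"),
     ("sewage", "sewage"), ("waste_water", "sewage"), ("sewage_discharge", "sewage"),
     ("plastic", "plastic"), ("microplastics", "plastic"), ("plastic_debris", "plastic"),
     ("algae", "algae"), ("algal_bloom", "algae"), ("red_tide", "algae")] := by decide

lemma pvCanon_notkey (t : String) (h : t ∉ pvKeys) :
    PySem.Dict.getD pvCanonTable t t = t := by
  simp only [pvKeys, List.mem_cons, List.not_mem_nil, or_false, not_or] at h
  obtain ⟨h1, h2, h3, h4, h5, h6, h7, h8, h9, h10, h11, h12, h13, h14, h15, h16⟩ := h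
  have e1 : ("oil" == t) = false := beq_eq_false_iff_ne.mpr (Ne.symm h1)
  have e2 : ("oil_spill" == t) = false := beq_eq_false_iff_ne.mpr (Ne.symm h2)
  have e3 : ("crude_oil" == t) = false := beq_eq_false_iff_ne.mpr (Ne.symm h3)
  have e4 : ("petroleum" == t) = false := beq_eq_false_iff_ne.mpr (Ne.symm h4)
  have e5 : ("chemical" == t) = false := beq_eq_false_iff_ne.mpr (Ne.symm h5)
  have e6 : ("chemical_spill" == t) = false := beq_eq_false_iff_ne.mpr (Ne.symm h6)
  have e7 : ("toxic_chemicals" == t) = false := beq_eq_false_iff_ne.mpr (Ne.symm h7)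
  have e8 : ("sewage" == t) = false := beq_eq_false_iff_ne.mpr (Ne.symm h8)
  have e9 : ("waste_water" == t) = false := beq_eq_false_iff_ne.mpr (Ne.symm h9)
  have e10 : ("sewage_discharge" == t) = false := beq_eq_false_iff_ne.mpr (Ne.symm h10)
  have e11 : ("plastic" == t) = false := beq_eq_false_iff_ne.mpr (Ne.symm h11)
  have e12 : ("microplastics" == t) = false := beq_eq_false_iff_ne.mpr (Ne.symm h12)
  have e13 : ("plastic_debris" == t) = false := beq_eq_false_iff_ne.mpr (Ne.symm h13)
  have e14 : ("algae" == t) = false := beq_eq_false_iff_ne.mpr (Ne.symm h14)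
  have e15 : ("algal_bloom" == t) = false := beq_eq_false_iff_ne.mpr (Ne.symm h15)
  have e16 : ("red_tide" == t) = false := beq_eq_false_iff_ne.mpr (Ne.symm h16)
  simp [pvCanonTable_eq, PySem.Dict.getD_eq_get?_getD, PySem.Dict.get?, e1, e2, e3, e4, e5, e6, e7, e8, e9, e10, e11, e12, e13, e14, e15, e16]

lemma pvKeys_loop_canon : ∀ a ∈ pvKeys, ∀ b ∈ pvKeys,
    pvLoopA a b pvSynonymsA =
      (PySem.Dict.getD pvCanonTable a a == PySem.Dict.getD pvCanonTable b b) := by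
  simp only [pvCanonTable_eq]
  decide

lemma pvCanon_key_mem (t : String) (h : t ∈ pvKeys) :
    PySem.Dict.getD pvCanonTable t t ∈ pvKeys := by
  rw [pvCanonTable_eq]
  fin_cases h <;> decide

-- ===== VERDICT (by name: the statement is the Claim_ definition above) =====
theorem is_same_pollutant_type_spec : Claim_equal_is_same_pollutant_type := by
  unfold Claim_equal_is_same_pollutant_type Spec_is_same_pollutant_type
  intro t1 t2 _
  by_cases heq : t1 = t2
  · simp [is_same_pollutant_type, is_same_pollutant_type_alt, heq]
  · simp only [is_same_pollutant_type, is_same_pollutant_type_alt, beq_iff_eq, if_neg heq]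
    by_cases hk1 : t1 ∈ pvKeys
    · by_cases hk2 : t2 ∈ pvKeys
      · exact pvKeys_loop_canon t1 hk1 t2 hk2
      · rw [pvLoopA_false_right t1 t2 hk2, pvCanon_notkey t2 hk2]
        have hc : PySem.Dict.getD pvCanonTable t1 t1 ≠ t2 :=
          fun he => hk2 (he ▸ pvCanon_key_mem t1 hk1)
        simp [hc]
    · rw [pvLoopA_false_left t1 t2 hk1, pvCanon_notkey t1 hk1]
      by_cases hk2 : t2 ∈ pvKeys
      · have hc : t1 ≠ PySem.Dict.getD pvCanonTable t2 t2 :=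
          fun he => hk1 (he ▸ pvCanon_key_mem t2 hk2)
        simp [hc]
      · rw [pvCanon_notkey t2 hk2]
        simp [heq]
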